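-- pv_equiv track=rewrite | github.com/robeverest/cs1010 | week4/trump_or_bot.py | create_word_map
-- ===== SOURCE A (Python) =====
-- def create_word_map(tweets, prefix_length):
--     word_map = { tuple(): {} }
--     for tweet in tweets:
--         prefix = tuple()
--         for word in tweet.split():
--             if word in word_map[prefix]:
--                 word_map[prefix][word] += 1
--             else:
--                 word_map[prefix][word] = 1
--             prefix = prefix + (word,)
--             if len(prefix) > prefix_length:
--                 prefix = prefix[1:]
--             if prefix not in word_map:
--                 word_map[prefix] = {}
--     return word_map
-- ===== SOURCE B (Python) =====
-- def create_word_map(tweets, prefix_length):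
--     # Stage 1: flatten all tweets into one linear event stream.
--     # (True, prefix, word)  -> increment count of word under prefix
--     # (False, prefix, None) -> ensure prefix is a key of the map
--     events = []
--     for tweet in tweets:
--         words = tweet.split()
--         for i in range(len(words)):
--             events.append((True, tuple(words[max(0, i - prefix_length):i]), words[i]))
--             events.append((False, tuple(words[max(0, i + 1 - prefix_length):i + 1]), None))
--     # Stage 2: interpret the event stream.
--     word_map = {(): {}}
--     for is_count, pre, w in events:
--         if is_count:
--             counts = word_map[pre]  # pre is always present: () initially, later ensured by the preceding key event
--             counts[w] = counts.get(w, 0) + 1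
--         else:
--             word_map.setdefault(pre, {})
--     return word_map
-- ===== Notes on version B (the rewrite author's own statement) =====
-- stated objective: alternative
-- what changed: B is restructured into two staged passes: it first flattens all tweets into one linear event stream of count/ensure-key events (computing each bounded prefix by index slicing), then a separate interpreter loop folds that stream into the nested dict, replacing A's single pass that threads a rolling prefix tuple while mutating the map in place.
import Mathlib
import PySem

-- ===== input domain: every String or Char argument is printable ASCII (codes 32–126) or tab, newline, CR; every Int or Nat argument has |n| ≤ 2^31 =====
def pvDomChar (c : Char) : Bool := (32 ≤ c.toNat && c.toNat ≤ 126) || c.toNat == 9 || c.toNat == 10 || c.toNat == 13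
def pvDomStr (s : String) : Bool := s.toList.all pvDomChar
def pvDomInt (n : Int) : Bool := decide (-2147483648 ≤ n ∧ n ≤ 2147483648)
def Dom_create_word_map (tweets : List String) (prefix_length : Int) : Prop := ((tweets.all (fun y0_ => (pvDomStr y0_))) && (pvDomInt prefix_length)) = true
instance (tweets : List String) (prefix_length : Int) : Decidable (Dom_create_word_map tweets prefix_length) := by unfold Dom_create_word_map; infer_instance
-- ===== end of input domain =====

-- B replaces A's single pass (rolling prefix tuple, in-place map updates) by two staged passes:
-- first flatten all tweets into one linear event stream, then interpret the stream into the map.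

abbrev WMap := PySem.Dict (List String) (PySem.Dict String Int)

-- ===== PORT A =====
-- one iteration of A's inner 'for word in tweet.split()' loop; state = (word_map, prefix)
def aStep (prefix_length : Int) (st : WMap × List String) (word : String) : WMap × List String :=
  let word_map := st.1
  let pref := st.2
  let counts := word_map.getD pref PySem.Dict.empty
  let counts := if counts.contains word then counts.insert word (counts.getD word 0 + 1)
                else counts.insert word 1
  let word_map := word_map.insert pref counts
  let pref := pref ++ [word]
  -- 'prefix = prefix[1:]' when the window got too long
  let pref := if (pref.length : Int) > prefix_length then PySem.List.slice pref (some 1) none else pref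
  let word_map := if word_map.contains pref then word_map else word_map.insert pref PySem.Dict.empty
  (word_map, pref)

def aTweet (prefix_length : Int) (word_map : WMap) (tweet : String) : WMap :=
  ((PySem.Str.split₀ tweet).foldl (aStep prefix_length) (word_map, [])).1

def create_word_map (tweets : List String) (prefix_length : Int) : List (List String × List (String × Int)) :=
  let word_map : WMap := PySem.Dict.empty.insert [] PySem.Dict.empty
  ((tweets.foldl (aTweet prefix_length) word_map).items).map (fun p => (p.1, p.2.items))

-- ===== PORT B =====
-- an event: (is_count, prefix, word); key-ensure events carry "" for Python's None
-- the two events B emits for index i of a tweet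
def evAt (words : List String) (pl : Int) (i : Nat) : List (Bool × List String × String) :=
  [(true, PySem.List.slice words (some (max 0 ((i : Int) - pl))) (some (i : Int)),
    PySem.List.pyGetD words (i : Int) ""),
   (false, PySem.List.slice words (some (max 0 ((i : Int) + 1 - pl))) (some ((i : Int) + 1)),
    "")]

-- Stage 1: the event stream of one tweet ('events.append(...)' twice per index i)
def tweetEvents (prefix_length : Int) (tweet : String) : List (Bool × List String × String) :=
  let words := PySem.Str.split₀ tweet
  (List.range words.length).flatMap (evAt words prefix_length)

-- Stage 2: interpret one event.  'word_map[pre]' is ported as getD: pre is always present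
-- (() initially, later keys ensured by the preceding key event), so getD is exact here.
def applyEv (word_map : WMap) (e : Bool × List String × String) : WMap :=
  if e.1 then
    let counts := word_map.getD e.2.1 PySem.Dict.empty
    word_map.insert e.2.1 (counts.insert e.2.2 (counts.getD e.2.2 0 + 1))
  else
    word_map.setdefault e.2.1 PySem.Dict.empty

def create_word_map_alt (tweets : List String) (prefix_length : Int) : List (List String × List (String × Int)) :=
  let events := tweets.foldl (fun acc tweet => acc ++ tweetEvents prefix_length tweet) []
  let word_map : WMap := PySem.Dict.empty.insert [] PySem.Dict.empty
  ((events.foldl applyEv word_map).items).map (fun p => (p.1, p.2.items))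

-- ===== PRECONDITION & SPEC =====
def Spec_create_word_map (tweets : List String) (prefix_length : Int) (out : List (List String × List (String × Int))) : Prop := out = create_word_map_alt tweets prefix_length
instance (tweets : List String) (prefix_length : Int) (out : List (List String × List (String × Int))) : Decidable (Spec_create_word_map tweets prefix_length out) := by unfold Spec_create_word_map; infer_instance

-- ===== CLAIM (what is proved, stated in full; the proofs are below) =====
def Claim_equal_create_word_map : Prop := ∀ (tweets : List String) (prefix_length : Int), Dom_create_word_map tweets prefix_length → Spec_create_word_map tweets prefix_length (create_word_map tweets prefix_length)

-- ===== LEMMAS AND PROOFS =====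

-- A's prefix state after the first i words of the tweet
def pfx (words : List String) (pl : Int) (i : Nat) : List String :=
  (words.take i).drop (min i ((i : Int) - pl).toNat)

-- B's slice computes exactly A's prefix state
theorem slice_eq_pfx (words : List String) (pl : Int) (i : Nat) :
    PySem.List.slice words (some (max 0 ((i : Int) - pl))) (some (i : Int)) = pfx words pl i := by
  unfold pfx
  rw [PySem.List.slice_toNat _ (le_max_left 0 _) (Int.natCast_nonneg i)]
  have h1 : (max 0 ((i:Int) - pl)).toNat = ((i:Int) - pl).toNat := by omega
  have h2 : ((i:Int) : Int).toNat = i := by omega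
  rw [h1, h2, List.drop_take]
  by_cases h : ((i:Int) - pl).toNat ≤ i
  · rw [min_eq_right h]
  · rw [min_eq_left (by omega)]
    have : i - ((i:Int) - pl).toNat = 0 := by omega
    simp only [this]
    simp

-- A's prefix update recomputes the next bounded window
theorem pfx_step (words : List String) (pl : Int) (i : Nat) (h : i < words.length) :
    (if ((pfx words pl i ++ [words[i]]).length : Int) > pl
      then PySem.List.slice (pfx words pl i ++ [words[i]]) (some 1) none
      else pfx words pl i ++ [words[i]]) = pfx words pl (i + 1) := by
  unfold pfx
  have htake : words.take (i+1) = words.take i ++ [words[i]] := by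
    rw [List.take_add_one]; simp [List.getElem?_eq_getElem h]
  have hti : (words.take i).length = i := by simp; omega
  rw [PySem.List.slice_from_one, htake]
  push_cast
  rcases lt_or_ge (i : Int) pl with hc | hc
  · -- pl > i : window not yet full
    have h1 : min i ((i : Int) - pl).toNat = 0 := by omega
    have h2 : min (i+1) (((i:Int) + 1) - pl).toNat = 0 := by omega
    rw [h1, h2, if_neg (by simp; omega)]
    simp
  · rcases le_or_gt 0 pl with hp | hp
    · -- 0 ≤ pl ≤ i : full window slides one step
      have h1 : min i ((i : Int) - pl).toNat = i - pl.toNat := by omega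
      have h2 : min (i+1) (((i:Int) + 1) - pl).toNat = i - pl.toNat + 1 := by omega
      rw [h1, h2, if_pos (by simp [hti]; omega)]
      rw [List.drop_append, hti]
      rcases Nat.eq_zero_or_pos pl.toNat with hz | hz
      · simp [hz, List.drop_eq_nil_of_le (le_of_eq hti)]
      · have hu : ((words.take i).drop (i - pl.toNat)).length = pl.toNat := by simp [hti]; omega
        rw [List.tail_append_of_ne_nil (by intro hnil; rw [hnil] at hu; simp at hu; omega)]
        have : (i - pl.toNat + 1) - i = 0 := by omega
        rw [this, List.drop_zero, List.tail_drop]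
    · -- pl < 0 : the window is always empty
      have h1 : min i ((i : Int) - pl).toNat = i := by omega
      have h2 : min (i+1) (((i:Int) + 1) - pl).toNat = i + 1 := by omega
      rw [h1, h2, if_pos (by simp; omega)]
      rw [List.drop_eq_nil_of_le (le_of_eq hti)]
      simp [List.drop_eq_nil_of_le]

-- Python's 'if k not in d: d[k] = v' is dict.setdefault
theorem if_contains_eq_setdefault {K V : Type} [BEq K] (d : PySem.Dict K V) (k : K) (v : V) :
    (if d.contains k then d else d.insert k v) = d.setdefault k v := by
  by_cases h : d.contains k
  · rw [if_pos h, PySem.Dict.setdefault_of_contains d v h]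
  · rw [if_neg h, PySem.Dict.setdefault_of_not_contains d v (by simpa using h)]

-- one step of A = interpreting B's two events for index i, with the prefix invariant threaded
theorem step_eq (words : List String) (pl : Int) (i : Nat) (h : i < words.length) (wm : WMap) :
    aStep pl (wm, pfx words pl i) words[i]
      = ((evAt words pl i).foldl applyEv wm, pfx words pl (i + 1)) := by
  unfold aStep evAt applyEv
  simp only [List.foldl_cons, List.foldl_nil, reduceIte]
  have hw : PySem.List.pyGetD words (i : Int) "" = words[i] := by
    rw [PySem.List.pyGetD_eq_getElem words "" (by omega) (by exact_mod_cast h)]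
    simp
  have hpre := slice_eq_pfx words pl i
  have hnxt : PySem.List.slice words (some (max 0 ((i : Int) + 1 - pl))) (some ((i : Int) + 1))
      = pfx words pl (i+1) := by
    have := slice_eq_pfx words pl (i+1)
    push_cast at this
    exact this
  rw [hw, hpre, hnxt]
  have hcounts : (if (wm.getD (pfx words pl i) PySem.Dict.empty).contains words[i]
        then (wm.getD (pfx words pl i) PySem.Dict.empty).insert words[i]
              ((wm.getD (pfx words pl i) PySem.Dict.empty).getD words[i] 0 + 1)
        else (wm.getD (pfx words pl i) PySem.Dict.empty).insert words[i] 1)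
      = (wm.getD (pfx words pl i) PySem.Dict.empty).insert words[i]
              ((wm.getD (pfx words pl i) PySem.Dict.empty).getD words[i] 0 + 1) := by
    by_cases hk : (wm.getD (pfx words pl i) PySem.Dict.empty).contains words[i]
    · rw [if_pos hk]
    · rw [if_neg hk,
          PySem.Dict.getD_of_not_contains (wm.getD (pfx words pl i) PySem.Dict.empty) (0 : Int)
            (by simpa using hk)]
      norm_num
  rw [hcounts, pfx_step words pl i h, if_contains_eq_setdefault]
  simp

-- A's inner word loop = interpreting B's event stream for the tweet's indices
theorem loop_eq (words : List String) (pl : Int) :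
    ∀ (k i : Nat) (wm : WMap), i + k = words.length →
      (List.foldl (aStep pl) (wm, pfx words pl i) (words.drop i)).1
        = List.foldl applyEv wm ((List.range' i k).flatMap (evAt words pl)) := by
  intro k
  induction k with
  | zero =>
    intro i wm hik
    rw [List.drop_eq_nil_of_le (by omega)]
    simp
  | succ k ih =>
    intro i wm hik
    have hi : i < words.length := by omega
    rw [List.drop_eq_getElem_cons hi, List.range'_succ]
    simp only [List.foldl_cons, List.flatMap_cons, List.foldl_append]
    rw [step_eq words pl i hi wm]
    exact ih (i+1) _ (by omega)

-- A's per-tweet loop = interpreting the tweet's event stream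
theorem tweet_eq (pl : Int) (wm : WMap) (tweet : String) :
    aTweet pl wm tweet = List.foldl applyEv wm (tweetEvents pl tweet) := by
  unfold aTweet tweetEvents
  show (List.foldl (aStep pl) (wm, []) (PySem.Str.split₀ tweet)).1
      = List.foldl applyEv wm
          ((List.range (PySem.Str.split₀ tweet).length).flatMap (evAt (PySem.Str.split₀ tweet) pl))
  have h0 : pfx (PySem.Str.split₀ tweet) pl 0 = [] := by simp [pfx]
  have hmain := loop_eq (PySem.Str.split₀ tweet) pl (PySem.Str.split₀ tweet).length 0 wm (by omega)
  rw [h0, List.drop_zero] at hmain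
  rw [List.range_eq_range']
  exact hmain

-- A's outer loop = interpreting the concatenated event stream of all tweets
theorem outer_eq (pl : Int) (tweets : List String) :
    ∀ (wm : WMap) (acc : List (Bool × List String × String)),
      tweets.foldl (aTweet pl) (List.foldl applyEv wm acc)
        = List.foldl applyEv wm (tweets.foldl (fun a t => a ++ tweetEvents pl t) acc) := by
  induction tweets with
  | nil => intro wm acc; simp
  | cons t ts ih =>
    intro wm acc
    simp only [List.foldl_cons]
    rw [tweet_eq pl _ t, ← List.foldl_append]
    exact ih wm (acc ++ tweetEvents pl t)

-- ===== VERDICT (by name: the statement is the Claim_ definition above) =====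
theorem create_word_map_spec : Claim_equal_create_word_map := by
  intro tweets pl _
  unfold Spec_create_word_map create_word_map create_word_map_alt
  have := outer_eq pl tweets (PySem.Dict.empty.insert [] PySem.Dict.empty) []
  simp only [List.foldl_nil] at this
  simp only [this]
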